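-- pv_equiv track=rewrite | github.com/kleer001/PotionWorld | analysis_hand_odds.py | build_proposed_level2_deck
-- ===== SOURCE A (Python) =====
-- def build_proposed_level2_deck(card_db):
--     """Proposed level 2: no implied cards, 5 open slots.
--
--     Deck: P x3, E x3, + x3, - x3, H x3, S x2, D x2, 5 x3, 10 x2
--     plus action_redraw and action_grace.
--     """
--     token_to_card = {}
--     for cid, cdata in card_db.items():
--         if cdata.get("type") == "grammar":
--             tok = cdata["token"]
--             if tok not in token_to_card:
--                 token_to_card[tok] = cdata
--
--     deck = []
--     composition = [
--         ("P", 3), ("E", 3), ("+", 3), ("-", 3),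
--         ("H", 3), ("S", 2), ("D", 2), ("5", 3), ("10", 2),
--     ]
--     for token, count in composition:
--         if token in token_to_card:
--             for _ in range(count):
--                 deck.append(dict(token_to_card[token]))
--
--     # Add action cards
--     for aid in ["action_redraw", "action_grace"]:
--         if aid in card_db:
--             deck.append(dict(card_db[aid]))
--
--     return deck
-- ===== SOURCE B (Python) =====
-- def build_proposed_level2_deck(card_db):
--     """Proposed level 2 deck, built by scanning card_db directly per token (no prebuilt index)."""
--     composition = [
--         ("P", 3), ("E", 3), ("+", 3), ("-", 3),
--         ("H", 3), ("S", 2), ("D", 2), ("5", 3), ("10", 2),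
--     ]
--     deck = []
--     for token, count in composition:
--         for cdata in card_db.values():
--             if cdata.get("type") == "grammar" and cdata["token"] == token:
--                 deck += [dict(cdata) for _ in range(count)]
--                 break
--     deck.extend(dict(card_db[aid]) for aid in ("action_redraw", "action_grace") if aid in card_db)
--     return deck
-- ===== Notes on version B (the rewrite author's own statement) =====
-- stated objective: simpler
-- what changed: Drops the prebuilt token->card dict; for each composition token B scans card_db in order for the first grammar card with that token (break on hit), then appends the action cards via a comprehension.
import Mathlib
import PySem

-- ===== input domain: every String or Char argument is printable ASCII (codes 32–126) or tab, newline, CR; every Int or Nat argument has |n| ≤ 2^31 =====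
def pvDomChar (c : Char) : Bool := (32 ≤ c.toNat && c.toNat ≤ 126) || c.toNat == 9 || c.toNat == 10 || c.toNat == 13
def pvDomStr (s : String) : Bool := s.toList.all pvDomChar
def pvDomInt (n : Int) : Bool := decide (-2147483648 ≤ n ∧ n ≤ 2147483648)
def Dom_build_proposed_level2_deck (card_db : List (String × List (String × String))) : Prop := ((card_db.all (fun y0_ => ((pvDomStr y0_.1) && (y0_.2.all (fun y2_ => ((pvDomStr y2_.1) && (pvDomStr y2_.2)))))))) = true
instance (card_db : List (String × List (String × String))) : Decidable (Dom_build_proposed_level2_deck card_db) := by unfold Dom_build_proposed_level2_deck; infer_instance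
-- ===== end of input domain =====

-- B drops A's prebuilt token->card index and instead scans card_db in order per composition token.

-- the fixed composition list, shared by both Pythons verbatim
def pvComposition : List (String × Nat) :=
  [("P", 3), ("E", 3), ("+", 3), ("-", 3), ("H", 3), ("S", 2), ("D", 2), ("5", 3), ("10", 2)]

-- ===== PORT A =====
-- A's first loop: build token_to_card, first grammar card per token wins.
-- cdata["token"] raises KeyError when absent: Pre_ excludes that, the port reads getD "".
def pvStep (t2c : PySem.Dict String (List (String × String)))
    (entry : String × List (String × String)) : PySem.Dict String (List (String × String)) :=
  if PySem.Dict.get? (PySem.Dict.mk entry.2) "type" = some "grammar" then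
    let tok := (PySem.Dict.get? (PySem.Dict.mk entry.2) "token").getD ""
    if t2c.contains tok then t2c else t2c.insert tok entry.2
  else t2c

def pvIndex (card_db : List (String × List (String × String))) :
    PySem.Dict String (List (String × String)) :=
  card_db.foldl pvStep PySem.Dict.empty

def build_proposed_level2_deck (card_db : List (String × List (String × String))) :
    List (List (String × String)) :=
  ["action_redraw", "action_grace"].foldl (fun deck aid =>
    if (PySem.Dict.mk card_db).contains aid then
      deck ++ [(PySem.Dict.get? (PySem.Dict.mk card_db) aid).getD []]
    else deck)
    (pvComposition.foldl (fun deck tc =>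
      if (pvIndex card_db).contains tc.1 then
        (List.range tc.2).foldl (fun d _ => d ++ [(PySem.Dict.get? (pvIndex card_db) tc.1).getD []]) deck
      else deck) [])

-- ===== PORT B =====
-- B's inner scan: first card in order with type "grammar" and that token (break).
def pvFindGrammar (tok : String) :
    List (String × List (String × String)) → Option (List (String × String))
  | [] => none
  | entry :: rest =>
      if PySem.Dict.get? (PySem.Dict.mk entry.2) "type" = some "grammar" then
        if (PySem.Dict.get? (PySem.Dict.mk entry.2) "token").getD "" = tok then some entry.2
        else pvFindGrammar tok rest
      else pvFindGrammar tok rest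

def build_proposed_level2_deck_alt (card_db : List (String × List (String × String))) :
    List (List (String × String)) :=
  (pvComposition.foldl (fun deck tc =>
    match pvFindGrammar tc.1 card_db with
    | some cdata => deck ++ List.replicate tc.2 cdata
    | none => deck) []) ++ (["action_redraw", "action_grace"].filterMap
    (fun aid => PySem.Dict.get? (PySem.Dict.mk card_db) aid))

-- ===== PRECONDITION & SPEC =====
-- Pre_ excludes exactly the inputs where A raises KeyError: a card of type "grammar" lacking a "token" key.
def Pre_build_proposed_level2_deck (card_db : List (String × List (String × String))) : Prop :=
  ∀ e ∈ card_db, PySem.Dict.get? (PySem.Dict.mk e.2) "type" = some "grammar" →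
    (PySem.Dict.get? (PySem.Dict.mk e.2) "token").isSome
instance (card_db : List (String × List (String × String))) : Decidable (Pre_build_proposed_level2_deck card_db) := by unfold Pre_build_proposed_level2_deck; infer_instance

def pvWitness_build_proposed_level2_deck : (List (String × List (String × String))) :=
  [("c1", [("type", "grammar"), ("token", "P")]),
   ("c2", [("type", "grammar"), ("token", "5")]),
   ("action_redraw", [("type", "action")])]

def Spec_build_proposed_level2_deck (card_db : List (String × List (String × String))) (out : List (List (String × String))) : Prop := out = build_proposed_level2_deck_alt card_db
instance (card_db : List (String × List (String × String))) (out : List (List (String × String))) : Decidable (Spec_build_proposed_level2_deck card_db out) := by unfold Spec_build_proposed_level2_deck; infer_instance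

-- ===== CLAIM (what is proved, stated in full; the proofs are below) =====
def Claim_equal_build_proposed_level2_deck : Prop := ∀ (card_db : List (String × List (String × String))), Dom_build_proposed_level2_deck card_db → Pre_build_proposed_level2_deck card_db → Spec_build_proposed_level2_deck card_db (build_proposed_level2_deck card_db)

-- ===== LEMMAS AND PROOFS =====

-- A's index looked up at tok equals B's ordered first-grammar scan (accumulator-generalised).
theorem pvIndex_get_aux (tok : String) :
    ∀ (l : List (String × List (String × String)))
      (acc : PySem.Dict String (List (String × String))),
      (∀ e ∈ l, PySem.Dict.get? (PySem.Dict.mk e.2) "type" = some "grammar" →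
        (PySem.Dict.get? (PySem.Dict.mk e.2) "token").isSome) →
      PySem.Dict.get? (l.foldl pvStep acc) tok
      = (PySem.Dict.get? acc tok).or (pvFindGrammar tok l) := by
  intro l
  induction l with
  | nil => intro acc _; simp [pvFindGrammar]
  | cons e rest ih =>
    intro acc hpre
    have hrest : ∀ e ∈ rest, PySem.Dict.get? (PySem.Dict.mk e.2) "type" = some "grammar" →
        (PySem.Dict.get? (PySem.Dict.mk e.2) "token").isSome := by
      intro x hx; exact hpre x (List.mem_cons_of_mem _ hx)
    by_cases hg : PySem.Dict.get? (PySem.Dict.mk e.2) "type" = some "grammar"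
    · set t := (PySem.Dict.get? (PySem.Dict.mk e.2) "token").getD "" with ht
      have hfind : pvFindGrammar tok (e :: rest)
          = if t = tok then some e.2 else pvFindGrammar tok rest := by
        simp only [pvFindGrammar]
        rw [if_pos hg, ← ht]
      by_cases hc : PySem.Dict.contains acc t
      · -- token already indexed: acc wins, and acc.get? t is some
        have hsome : (PySem.Dict.get? acc t).isSome := by
          rwa [PySem.Dict.contains_eq_isSome_get?] at hc
        have hstep : pvStep acc e = acc := by
          simp only [pvStep]
          rw [if_pos hg, ← ht, if_pos hc]
        rw [List.foldl_cons, hstep, ih acc hrest, hfind]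
        by_cases he : t = tok
        · subst he
          obtain ⟨v, hv⟩ := Option.isSome_iff_exists.mp hsome
          simp [hv]
        · simp [he]
      · have hstep : pvStep acc e = acc.insert t e.2 := by
          simp only [pvStep]
          rw [if_pos hg, ← ht, if_neg hc]
        rw [List.foldl_cons, hstep, ih (acc.insert t e.2) hrest, hfind]
        by_cases he : t = tok
        · subst he
          have hnone : PySem.Dict.get? acc t = none := by
            rw [PySem.Dict.contains_eq_isSome_get?] at hc
            exact Option.not_isSome_iff_eq_none.mp (by simp [hc])
          rw [PySem.Dict.get?_insert_self]
          simp [hnone]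
        · rw [PySem.Dict.get?_insert]
          simp [he, Ne.symm he]
    · have hstep : pvStep acc e = acc := by simp only [pvStep]; rw [if_neg hg]
      have hfind : pvFindGrammar tok (e :: rest) = pvFindGrammar tok rest := by
        simp only [pvFindGrammar]
        rw [if_neg hg]
      rw [List.foldl_cons, hstep, ih acc hrest, hfind]

theorem pvIndex_get (card_db : List (String × List (String × String)))
    (hpre : Pre_build_proposed_level2_deck card_db) (tok : String) :
    PySem.Dict.get? (pvIndex card_db) tok = pvFindGrammar tok card_db := by
  unfold pvIndex
  rw [pvIndex_get_aux tok card_db PySem.Dict.empty hpre]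
  simp

-- ===== VERDICT (by name: the statement is the Claim_ definition above) =====
theorem build_proposed_level2_deck_spec : Claim_equal_build_proposed_level2_deck := by
  intro card_db _ hpre
  unfold Spec_build_proposed_level2_deck build_proposed_level2_deck build_proposed_level2_deck_alt
  have hmain : pvComposition.foldl (fun deck tc =>
      if (pvIndex card_db).contains tc.1 then
        (List.range tc.2).foldl (fun d _ => d ++ [(PySem.Dict.get? (pvIndex card_db) tc.1).getD []]) deck
      else deck) []
    = pvComposition.foldl (fun deck tc =>
      match pvFindGrammar tc.1 card_db with
      | some cdata => deck ++ List.replicate tc.2 cdata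
      | none => deck) [] := by
    apply PySem.List.foldl_congr_mem
    intro deck tc _
    rw [PySem.Dict.contains_eq_isSome_get?, pvIndex_get card_db hpre tc.1]
    cases h : pvFindGrammar tc.1 card_db with
    | none => simp
    | some c => simp
  rw [hmain]
  set dk := pvComposition.foldl (fun deck tc =>
      match pvFindGrammar tc.1 card_db with
      | some cdata => deck ++ List.replicate tc.2 cdata
      | none => deck) []
  cases h1 : PySem.Dict.get? (PySem.Dict.mk card_db) "action_redraw" with
  | none =>
    cases h2 : PySem.Dict.get? (PySem.Dict.mk card_db) "action_grace" with
    | none => simp [PySem.Dict.contains_eq_isSome_get?, h1, h2, List.filterMap]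
    | some c => simp [PySem.Dict.contains_eq_isSome_get?, h1, h2, List.filterMap]
  | some c =>
    cases h2 : PySem.Dict.get? (PySem.Dict.mk card_db) "action_grace" with
    | none => simp [PySem.Dict.contains_eq_isSome_get?, h1, h2, List.filterMap]
    | some c' => simp [PySem.Dict.contains_eq_isSome_get?, h1, h2, List.filterMap]
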